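-- pv_equiv track=rewrite | github.com/AxelRadin/LudoKan | backend/apps/games/views_igdb_helpers.py | build_translate_chunks
-- ===== SOURCE A (Python) =====
-- def split_sentences_for_translate(text: str) -> list[str]:
--     out: list[str] = []
--     start = 0
--     n = len(text)
--     i = 0
--     while i < n:
--         if text[i] in ".!?":
--             i += 1
--             while i < n and text[i] in " \t\n\r\f\v":
--                 i += 1
--             out.append(text[start:i])
--             start = i
--         else:
--             i += 1
--     if start < n:
--         out.append(text[start:])
--     stripped = [p for p in out if p.strip()]
--     return stripped if stripped else [text]
--
-- def build_translate_chunks(text: str, max_len: int = 480) -> list[str]: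
--     sentences = split_sentences_for_translate(text)
--     chunks: list[str] = []
--     current = ""
--     for s in sentences:
--         if len(current + s) > max_len:
--             if current.strip():
--                 chunks.append(current.strip())
--             current = s
--         else:
--             current += s
--     if current.strip():
--         chunks.append(current.strip())
--     if not chunks:
--         chunks = [text[:max_len]]
--     return chunks
-- ===== SOURCE B (Python) =====
-- _WS = " \t\n\r\f\v"
-- _TERM = ".!?"
--
-- def build_translate_chunks(text: str, max_len: int = 480) -> list[str]:
--     # One-pass state-machine tokenizer (no index arithmetic, no slicing):
--     # accumulate the current sentence char by char; after a terminator,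
--     # absorb trailing whitespace and flush lazily at the next non-space char.
--     sentences: list[str] = []
--     cur: list[str] = []
--     absorbing = False
--     for ch in text:
--         if absorbing:
--             if ch in _WS:
--                 cur.append(ch)
--                 continue
--             sentences.append("".join(cur))
--             cur = []
--         cur.append(ch)
--         absorbing = ch in _TERM
--     if cur:
--         sentences.append("".join(cur))
--     parts = [p for p in sentences if p.strip()]
--     if not parts:
--         parts = [text]
--     # Greedy grouping with a running length counter and a list of pieces
--     # joined only when a chunk is flushed (no repeated string concatenation).
--     chunks: list[str] = []
--     group: list[str] = []
--     glen = 0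
--     for s in parts:
--         if glen + len(s) > max_len:
--             if group:
--                 joined = "".join(group).strip()
--                 if joined:
--                     chunks.append(joined)
--             group = [s]
--             glen = len(s)
--         else:
--             group.append(s)
--             glen += len(s)
--     if group:
--         joined = "".join(group).strip()
--         if joined:
--             chunks.append(joined)
--     if not chunks:
--         chunks = [text[:max_len]]
--     return chunks
-- ===== Notes on version B (the rewrite author's own statement) =====
-- stated objective: alternative
-- what changed: The index-and-slice while-loop sentence scanner is replaced by a single character-at-a-time state-machine fold (accumulator + absorbing flag, lazy flush), and the greedy grouping no longer rebuilds a growing string: it keeps a list of pieces with a running length counter and joins only when a chunk is flushed.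
import Mathlib
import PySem

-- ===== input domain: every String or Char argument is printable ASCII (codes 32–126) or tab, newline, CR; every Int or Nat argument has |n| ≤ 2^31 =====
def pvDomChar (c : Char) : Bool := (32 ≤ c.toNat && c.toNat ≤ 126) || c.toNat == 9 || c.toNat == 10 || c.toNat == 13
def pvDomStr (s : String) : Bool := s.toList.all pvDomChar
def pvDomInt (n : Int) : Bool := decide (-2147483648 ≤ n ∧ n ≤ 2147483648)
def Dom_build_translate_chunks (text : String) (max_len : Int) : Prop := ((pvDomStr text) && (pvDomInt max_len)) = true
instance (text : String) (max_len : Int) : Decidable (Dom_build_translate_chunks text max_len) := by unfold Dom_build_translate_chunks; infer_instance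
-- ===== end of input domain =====

-- B replaces A's index-and-slice sentence scanner by a one-pass state-machine fold and the
-- string-concatenating greedy grouping by a piece-list with a running length counter (objective: alternative).

-- membership tests 'c in ".!?"' and 'c in " \t\n\r\f\v"' (shared by both Pythons)
def pvTerm (c : Char) : Bool := c = '.' || c = '!' || c = '?'
def pvWs (c : Char) : Bool := c = ' ' || c = '\t' || c = '\n' || c = '\r' || c = Char.ofNat 12 || c = Char.ofNat 11

-- ===== PORT A =====
-- inner 'while i < n and text[i] in " \t\n\r\f\v": i += 1' of A
def pvWsAdvance (cs : List Char) (i : Nat) : Nat :=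
  match h : cs[i]? with
  | some c => if pvWs c then pvWsAdvance cs (i+1) else i
  | none => i
termination_by cs.length - i
decreasing_by
  have hi : i < cs.length := (List.getElem?_eq_some_iff.mp h).1
  omega

-- the inner while never moves i backwards (cited by pvALoop's decreasing_by)
theorem pvWsAdvance_ge (cs : List Char) (i : Nat) : i ≤ pvWsAdvance cs i := by
  fun_induction pvWsAdvance cs i with
  | case1 i c h hws ih => omega
  | case2 i c h hws => omega
  | case3 i h => omega

-- A's outer while over indices; text[start:i] for 0 ≤ start ≤ i is (cs.drop start).take (i - start)
-- (PySem.List.slice_natCast), text[start:] is cs.drop start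
def pvALoop (cs : List Char) (start i : Nat) (out : List (List Char)) : List (List Char) :=
  match h : cs[i]? with
  | some c =>
    if pvTerm c then
      let j := pvWsAdvance cs (i+1)
      pvALoop cs j j (out ++ [(cs.drop start).take (j - start)])
    else
      pvALoop cs start (i+1) out
  | none => if start < cs.length then out ++ [cs.drop start] else out
termination_by cs.length - i
decreasing_by
  · have hi : i < cs.length := (List.getElem?_eq_some_iff.mp h).1
    have hj := pvWsAdvance_ge cs (i+1)
    omega
  · have hi : i < cs.length := (List.getElem?_eq_some_iff.mp h).1
    omega

-- split_sentences_for_translate (A), on List Char ('if p.strip()' = stripped nonempty)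
def pvSentencesA (cs : List Char) : List (List Char) :=
  let out := pvALoop cs 0 0 []
  let stripped := out.filter (fun p => !(PySem.Chars.strip p).isEmpty)
  if stripped.isEmpty then [cs] else stripped

-- A's grouping loop: 'current' is a growing string; len(current + s) = current.length + s.length
def pvAChunk (max_len : Int) (sentences : List (List Char)) (chunks : List (List Char)) (current : List Char) : List (List Char) :=
  match sentences with
  | [] => if (PySem.Chars.strip current).isEmpty then chunks else chunks ++ [PySem.Chars.strip current]
  | s :: rest =>
    if ((current.length : Int) + (s.length : Int)) > max_len then
      pvAChunk max_len rest
        (if (PySem.Chars.strip current).isEmpty then chunks else chunks ++ [PySem.Chars.strip current]) s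
    else
      pvAChunk max_len rest chunks (current ++ s)

def build_translate_chunks (text : String) (max_len : Int) : List String :=
  if (pvAChunk max_len (pvSentencesA text.toList) [] []).isEmpty then
    [String.ofList (PySem.List.slice text.toList none (some max_len))]
  else (pvAChunk max_len (pvSentencesA text.toList) [] []).map String.ofList

-- ===== PORT B =====
-- B's state-machine fold over the characters: (sentences, cur, absorbing)
def pvBFold (rest : List Char) (sents : List (List Char)) (cur : List Char) (absorbing : Bool) : List (List Char) :=
  match rest with
  | [] => if cur.isEmpty then sents else sents ++ [cur]
  | c :: rest =>
    if absorbing then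
      if pvWs c then pvBFold rest sents (cur ++ [c]) true
      else pvBFold rest (sents ++ [cur]) ([] ++ [c]) (pvTerm c)
    else pvBFold rest sents (cur ++ [c]) (pvTerm c)

def pvSentencesB (cs : List Char) : List (List Char) :=
  let sents := pvBFold cs [] [] false
  let parts := sents.filter (fun p => !(PySem.Chars.strip p).isEmpty)
  if parts.isEmpty then [cs] else parts

-- B's grouping: list of pieces + running length counter; '"".join(group)' is group.flatten
def pvBChunk (max_len : Int) (parts : List (List Char)) (chunks : List (List Char)) (group : List (List Char)) (glen : Int) : List (List Char) :=
  match parts with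
  | [] =>
    if group.isEmpty then chunks
    else
      let joined := PySem.Chars.strip group.flatten
      if joined.isEmpty then chunks else chunks ++ [joined]
  | s :: rest =>
    if glen + (s.length : Int) > max_len then
      pvBChunk max_len rest
        (if group.isEmpty then chunks
         else
           let joined := PySem.Chars.strip group.flatten
           if joined.isEmpty then chunks else chunks ++ [joined])
        [s] (s.length : Int)
    else
      pvBChunk max_len rest chunks (group ++ [s]) (glen + (s.length : Int))

def build_translate_chunks_alt (text : String) (max_len : Int) : List String :=
  if (pvBChunk max_len (pvSentencesB text.toList) [] [] 0).isEmpty then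
    [String.ofList (PySem.List.slice text.toList none (some max_len))]
  else (pvBChunk max_len (pvSentencesB text.toList) [] [] 0).map String.ofList

-- ===== PRECONDITION & SPEC =====
def Spec_build_translate_chunks (text : String) (max_len : Int) (out : List String) : Prop := out = build_translate_chunks_alt text max_len
instance (text : String) (max_len : Int) (out : List String) : Decidable (Spec_build_translate_chunks text max_len out) := by unfold Spec_build_translate_chunks; infer_instance

-- ===== CLAIM (what is proved, stated in full; the proofs are below) =====
def Claim_equal_build_translate_chunks : Prop := ∀ (text : String) (max_len : Int), Dom_build_translate_chunks text max_len → Spec_build_translate_chunks text max_len (build_translate_chunks text max_len)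

-- ===== LEMMAS AND PROOFS =====
-- a whitespace run while absorbing is absorbed wholesale and flushed at the next non-space (or end)
theorem pvBFold_ws_run (cs : List Char) (i : Nat) (sents : List (List Char)) (cur : List Char)
    (hcur : cur ≠ []) :
    pvBFold (cs.drop i) sents cur true =
      pvBFold (cs.drop (pvWsAdvance cs i))
        (sents ++ [cur ++ (cs.drop i).take (pvWsAdvance cs i - i)]) [] false := by
  fun_induction pvWsAdvance cs i generalizing sents cur with
  | case1 i c h hws ih =>
    have hi : i < cs.length := (List.getElem?_eq_some_iff.mp h).1
    have hd : cs.drop i = c :: cs.drop (i+1) := by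
      rw [List.drop_eq_getElem_cons hi]; simp [(List.getElem?_eq_some_iff.mp h).2]
    have hj := pvWsAdvance_ge cs (i+1)
    rw [hd]
    rw [show pvBFold (c :: cs.drop (i+1)) sents cur true
        = pvBFold (cs.drop (i+1)) sents (cur ++ [c]) true from by simp [pvBFold, hws]]
    rw [ih sents (cur ++ [c]) (by simp)]
    congr 2
    have h2 : pvWsAdvance cs (i+1) - i = (pvWsAdvance cs (i+1) - (i+1)) + 1 := by omega
    rw [h2, List.take_succ_cons]
    simp
  | case2 i c h hws =>
    have hi : i < cs.length := (List.getElem?_eq_some_iff.mp h).1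
    have hd : cs.drop i = c :: cs.drop (i+1) := by
      rw [List.drop_eq_getElem_cons hi]; simp [(List.getElem?_eq_some_iff.mp h).2]
    rw [hd]
    simp [pvBFold, hws]
  | case3 i h =>
    have hi : cs.length ≤ i := by
      by_contra hc
      rw [List.getElem?_eq_none_iff] at h; omega
    rw [List.drop_eq_nil_iff.mpr hi]
    simp [pvBFold, hcur]
-- A's scanner from state (start, i, out) equals B's fold over the remaining suffix
theorem pvALoop_eq_pvBFold (cs : List Char) (start i : Nat) (out : List (List Char))
    (hsi : start ≤ i) :
    pvALoop cs start i out = pvBFold (cs.drop i) out ((cs.drop start).take (i - start)) false := by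
  fun_induction pvALoop cs start i out with
  | case1 start i out c h hterm j ih =>
    have hjdef : j = pvWsAdvance cs (i+1) := rfl
    have hi : i < cs.length := (List.getElem?_eq_some_iff.mp h).1
    have hd : cs.drop i = c :: cs.drop (i+1) := by
      rw [List.drop_eq_getElem_cons hi]; simp [(List.getElem?_eq_some_iff.mp h).2]
    have hj : i + 1 ≤ j := hjdef ▸ pvWsAdvance_ge cs (i+1)
    rw [ih (le_refl _)]
    rw [hd]
    rw [show pvBFold (c :: cs.drop (i+1)) out ((cs.drop start).take (i - start)) false
        = pvBFold (cs.drop (i+1)) out ((cs.drop start).take (i - start) ++ [c]) (pvTerm c) from by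
          simp [pvBFold]]
    rw [hterm]
    rw [pvBFold_ws_run cs (i+1) out ((cs.drop start).take (i - start) ++ [c]) (by simp)]
    simp only [← hjdef]
    simp only [Nat.sub_self, List.take_zero]
    congr 2
    have hseg : j - start = (i - start) + (j - i) := by omega
    rw [hseg, List.take_add, List.drop_drop]
    have hds : start + (i - start) = i := by omega
    rw [hds, hd]
    have hji : j - i = (j - (i+1)) + 1 := by omega
    rw [hji, List.take_succ_cons]
    simp
  | case2 start i out c h hterm ih =>
    have hi : i < cs.length := (List.getElem?_eq_some_iff.mp h).1
    have hd : cs.drop i = c :: cs.drop (i+1) := by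
      rw [List.drop_eq_getElem_cons hi]; simp [(List.getElem?_eq_some_iff.mp h).2]
    rw [ih (by omega), hd]
    rw [show pvBFold (c :: cs.drop (i+1)) out ((cs.drop start).take (i - start)) false
        = pvBFold (cs.drop (i+1)) out ((cs.drop start).take (i - start) ++ [c]) (pvTerm c) from by
          simp [pvBFold]]
    rw [Bool.not_eq_true] at hterm
    rw [hterm]
    congr 1
    have h1 : i + 1 - start = (i - start) + 1 := by omega
    rw [h1, List.take_add_one]
    congr 1
    rw [List.getElem?_drop]
    have h2 : start + (i - start) = i := by omega
    rw [h2, h]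
    rfl
  | case3 start i out h hlt =>
    have hi : cs.length ≤ i := by
      by_contra hc
      rw [List.getElem?_eq_none_iff] at h; omega
    rw [List.drop_eq_nil_iff.mpr hi]
    have htk : (cs.drop start).take (i - start) = cs.drop start :=
      List.take_of_length_le (by simp; omega)
    rw [htk]
    simp [pvBFold, List.isEmpty_iff, List.drop_eq_nil_iff]
    omega
  | case4 start i out h hlt =>
    have hi : cs.length ≤ i := by
      by_contra hc
      rw [List.getElem?_eq_none_iff] at h; omega
    rw [List.drop_eq_nil_iff.mpr hi, List.drop_eq_nil_iff.mpr (by omega)]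
    simp [pvBFold]
-- grouping loops agree under the invariant current = group.flatten, glen = |current|
theorem pvAChunk_eq_pvBChunk (max_len : Int) (parts : List (List Char)) (chunks group : List (List Char))
    (current : List Char) (glen : Int)
    (hc : current = group.flatten) (hg : glen = (current.length : Int)) :
    pvAChunk max_len parts chunks current = pvBChunk max_len parts chunks group glen := by
  induction parts generalizing chunks group current glen with
  | nil =>
    subst hc hg
    by_cases hgr : group.isEmpty
    · rw [List.isEmpty_iff] at hgr
      subst hgr
      simp [pvAChunk, pvBChunk]
      decide
    · simp [pvAChunk, pvBChunk, hgr]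
  | cons s rest ih =>
    subst hc hg
    simp only [pvAChunk, pvBChunk]
    by_cases hcmp : (group.flatten.length : Int) + (s.length : Int) > max_len
    · rw [if_pos hcmp, if_pos hcmp]
      rw [ih _ [s] s (s.length) (by simp) (by simp)]
      congr 1
      by_cases hgr : group.isEmpty
      · rw [List.isEmpty_iff] at hgr
        subst hgr
        simp
        decide
      · simp [hgr]
    · rw [if_neg hcmp, if_neg hcmp]
      exact ih _ (group ++ [s]) (group.flatten ++ s) _ (by simp) (by simp)

theorem pvSentences_eq (cs : List Char) : pvSentencesA cs = pvSentencesB cs := by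
  unfold pvSentencesA pvSentencesB
  rw [show pvALoop cs 0 0 [] = pvBFold cs [] [] false from by
    simpa using pvALoop_eq_pvBFold cs 0 0 [] (le_refl 0)]

-- ===== VERDICT (by name: the statement is the Claim_ definition above) =====
theorem build_translate_chunks_spec : Claim_equal_build_translate_chunks := by
  intro text max_len _
  unfold Spec_build_translate_chunks build_translate_chunks build_translate_chunks_alt
  rw [pvSentences_eq, pvAChunk_eq_pvBChunk max_len (pvSentencesB text.toList) [] [] [] 0 rfl rfl]
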